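-- pv_equiv track=rewrite | github.com/wisdom-in-a-nutshell/.agents | skills-source/owned/health/scripts/query_health.py | _normalize_global_flags
-- ===== SOURCE A (Python) =====
-- def _normalize_global_flags(argv: list[str]) -> list[str]:
--     movable = {"--json", "--human", "--plain", "--no-input"}
--     front: list[str] = []
--     rest: list[str] = []
--     for token in argv:
--         if token in movable:
--             front.append(token)
--         else:
--             rest.append(token)
--     return front + rest
-- ===== SOURCE B (Python) =====
-- def _normalize_global_flags(argv: list[str]) -> list[str]:
--     movable = {"--json", "--human", "--plain", "--no-input"}
--     return sorted(argv, key=lambda t: t not in movable)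
-- ===== Notes on version B (the rewrite author's own statement) =====
-- stated objective: idiomatic
-- what changed: Replaced the explicit two-accumulator partition loop (front/rest lists, then concatenation) with a single stable sort keyed on non-membership in the movable set, which pulls movable flags to the front preserving relative order.
import Mathlib
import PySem

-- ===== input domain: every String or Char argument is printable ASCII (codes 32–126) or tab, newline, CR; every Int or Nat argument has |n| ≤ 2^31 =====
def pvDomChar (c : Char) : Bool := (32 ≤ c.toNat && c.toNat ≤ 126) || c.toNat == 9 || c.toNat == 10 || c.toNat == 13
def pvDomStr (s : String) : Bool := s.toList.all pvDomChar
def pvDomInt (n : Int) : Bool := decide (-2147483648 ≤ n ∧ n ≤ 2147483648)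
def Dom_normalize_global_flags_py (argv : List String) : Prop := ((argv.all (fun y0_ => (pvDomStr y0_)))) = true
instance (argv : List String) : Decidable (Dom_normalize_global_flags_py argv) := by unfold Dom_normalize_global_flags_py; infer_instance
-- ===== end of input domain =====

-- B replaces A's explicit two-list partition with a single stable sort keyed on
-- non-membership in the movable-flag set (more idiomatic; same result by stability).


-- ===== PORT A =====
-- Port of A: loop over argv appending to 'front' or 'rest', then front ++ rest.
def normalize_global_flags_py (argv : List String) : List String :=
  let movable : PySem.Set String := PySem.Set.ofList ["--json", "--human", "--plain", "--no-input"]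
  let p := argv.foldl
    (fun (acc : List String × List String) token =>
      if token ∈ movable then (acc.1 ++ [token], acc.2) else (acc.1, acc.2 ++ [token]))
    ([], [])
  p.1 ++ p.2

-- ===== PORT B =====
-- Port of B: stable sort with boolean key "t not in movable" (false < true).
def normalize_global_flags_py_alt (argv : List String) : List String :=
  let movable : PySem.Set String := PySem.Set.ofList ["--json", "--human", "--plain", "--no-input"]
  PySem.List.sorted argv (fun t => !(decide (t ∈ movable))) false

-- ===== PRECONDITION & SPEC =====
def Spec_normalize_global_flags_py (argv : List String) (out : List String) : Prop := out = normalize_global_flags_py_alt argv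
instance (argv : List String) (out : List String) : Decidable (Spec_normalize_global_flags_py argv out) := by unfold Spec_normalize_global_flags_py; infer_instance

-- ===== CLAIM (what is proved, stated in full; the proofs are below) =====
def Claim_equal_normalize_global_flags_py : Prop := ∀ (argv : List String), Dom_normalize_global_flags_py argv → Spec_normalize_global_flags_py argv (normalize_global_flags_py argv)

-- ===== LEMMAS AND PROOFS =====

-- the boolean key used by B (and, negated, A's membership test)
def pvKey (t : String) : Bool :=
  !(decide (t ∈ PySem.Set.ofList ["--json", "--human", "--plain", "--no-input"]))

-- the comparison PySem.List.sorted builds from pvKey (reverse = false)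
def pvBefore (a b : String) : Bool := decide (pvKey a < pvKey b)

-- inserting a key-false element into (falses ++ trues) puts it between them
lemma insertBy_false (x : String) (hx : pvKey x = false)
    (fs ts : List String) (hfs : ∀ f ∈ fs, pvKey f = false) (hts : ∀ t ∈ ts, pvKey t = true) :
    PySem.List.insertBy pvBefore x (fs ++ ts) = fs ++ x :: ts := by
  induction fs with
  | nil =>
    cases ts with
    | nil => simp [PySem.List.insertBy]
    | cons t ts' =>
      have ht : pvKey t = true := hts t (by simp)
      simp [PySem.List.insertBy, pvBefore, hx, ht]
  | cons f fs' ih =>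
    have hf : pvKey f = false := hfs f (by simp)
    have : pvBefore x f = false := by simp [pvBefore, hx, hf]
    have ih' := ih (fun g hg => hfs g (List.mem_cons_of_mem _ hg))
    simp [PySem.List.insertBy, this, ih']

-- inserting a key-true element goes to the very end
lemma insertBy_true (x : String) (hx : pvKey x = true) (l : List String) :
    PySem.List.insertBy pvBefore x l = l ++ [x] := by
  induction l with
  | nil => simp [PySem.List.insertBy]
  | cons y ys ih =>
    have : pvBefore x y = false := by
      simp [pvBefore, hx]
    simp [PySem.List.insertBy, this, ih]

-- B's stable sort on a two-valued key is the partition: key-false ones first, key-true ones after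
lemma sorted_partition (xs : List String) :
    PySem.List.sorted xs pvKey false
      = xs.filter (fun x => !pvKey x) ++ xs.filter (fun x => pvKey x) := by
  induction xs using List.reverseRecOn with
  | nil => simp [PySem.List.sorted]
  | append_singleton ys x ih =>
    have step : PySem.List.sorted (ys ++ [x]) pvKey false
        = PySem.List.insertBy pvBefore x (PySem.List.sorted ys pvKey false) := by
      simp only [PySem.List.sorted, List.foldl_append, List.foldl_cons, List.foldl_nil]
      rfl
    rw [step, ih]
    cases hx : pvKey x with
    | false =>
      rw [insertBy_false x hx _ _
        (fun f hf => by simpa using (List.of_mem_filter hf))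
        (fun t ht => by simpa using (List.of_mem_filter ht))]
      simp [List.filter_append, hx]
    | true =>
      rw [insertBy_true x hx]
      simp [List.filter_append, hx]

-- A's fold with the (front, rest) pair accumulator computes the two filters
lemma foldA (xs : List String) (fr re : List String) :
    xs.foldl
      (fun (acc : List String × List String) token =>
        if token ∈ PySem.Set.ofList ["--json", "--human", "--plain", "--no-input"]
        then (acc.1 ++ [token], acc.2) else (acc.1, acc.2 ++ [token]))
      (fr, re)
      = (fr ++ xs.filter (fun x => !pvKey x), re ++ xs.filter (fun x => pvKey x)) := by
  induction xs generalizing fr re with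
  | nil => simp
  | cons x xs ih =>
    by_cases hx : x ∈ PySem.Set.ofList ["--json", "--human", "--plain", "--no-input"]
    · have hk : pvKey x = false := by simp [pvKey, hx]
      rw [List.foldl_cons, if_pos hx, ih]
      simp [hk]
    · have hk : pvKey x = true := by simp [pvKey, hx]
      rw [List.foldl_cons, if_neg hx, ih]
      simp [hk]

-- ===== VERDICT (by name: the statement is the Claim_ definition above) =====
theorem normalize_global_flags_py_spec : Claim_equal_normalize_global_flags_py := by
  intro argv _
  show normalize_global_flags_py argv = normalize_global_flags_py_alt argv
  unfold normalize_global_flags_py normalize_global_flags_py_alt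
  have hB : (fun t => !(decide (t ∈ PySem.Set.ofList ["--json", "--human", "--plain", "--no-input"]))) = pvKey := by
    funext t; rfl
  simp only [hB]
  rw [sorted_partition, foldA]
  simp
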